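-- pv_equiv track=rewrite | github.com/lsp-client/LSAP | src/lsap_schema/locate.py | detect_marker
-- ===== SOURCE A (Python) =====
-- def detect_marker(text: str) -> tuple[str, int, int] | None:
--     """
--     Detect the marker in the text using nested bracket notation.
--
--     Returns tuple of (marker, start_pos, end_pos) or None if no marker found.
--
--     The marker detection uses the following priority:
--     1. <|> (single level)
--     2. <<|>> (double level)
--     3. <<<|>>> (triple level)
--     ... and so on
--
--     The function selects the marker with the most nesting levels that appears
--     exactly once in the text.
--     """
--     max_level = 10  # reasonable maximum nesting level
--
--     for level in range(1, max_level + 1):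
--         marker = "<" * level + "|" + ">" * level
--         count = text.count(marker)
--
--         if count == 1:
--             # Found a unique marker at this level
--             pos = text.find(marker)
--             return marker, pos, pos + len(marker)
--         elif count == 0:
--             # This level doesn't exist, try next
--             continue
--         else:
--             # Multiple occurrences, try higher nesting level
--             continue
--
--     return None
-- ===== SOURCE B (Python) =====
-- def _run_gt(s, j):
--     b = 0
--     while j + b < len(s) and s[j + b] == '>':
--         b += 1
--     return b
--
--
-- def detect_marker(text: str):
--     # One pass: for each '|' record min('<'-run before, '>'-run after) capped at 10.
--     pipes = []
--     run = 0
--     i = 0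
--     for c in text:
--         if c == '|':
--             pipes.append((i, min(run, _run_gt(text, i + 1), 10)))
--         run = run + 1 if c == '<' else 0
--         i += 1
--     for level in range(1, 11):
--         hits = [p for (p, m) in pipes if m >= level]
--         if len(hits) == 1:
--             p = hits[0]
--             return ("<" * level + "|" + ">" * level, p - level, p + level + 1)
--     return None
-- ===== Notes on version B (the rewrite author's own statement) =====
-- stated objective: alternative
-- what changed: Instead of running a full-text substring count (and then find) per nesting level, B scans the text once, recording for each pipe character the lengths of the open-angle run before it and the close-angle run after it (capped at 10), then picks the smallest level with exactly one qualifying pipe.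
import Mathlib
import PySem

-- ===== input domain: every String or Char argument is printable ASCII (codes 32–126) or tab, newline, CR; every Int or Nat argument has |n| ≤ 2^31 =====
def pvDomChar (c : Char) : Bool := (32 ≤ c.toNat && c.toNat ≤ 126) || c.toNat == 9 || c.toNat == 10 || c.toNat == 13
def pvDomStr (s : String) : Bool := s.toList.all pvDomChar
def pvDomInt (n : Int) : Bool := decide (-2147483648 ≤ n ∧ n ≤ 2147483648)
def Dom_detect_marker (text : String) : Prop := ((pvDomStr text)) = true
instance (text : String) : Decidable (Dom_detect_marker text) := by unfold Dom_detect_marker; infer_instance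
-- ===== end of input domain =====

-- B replaces the per-level str.count/str.find scans by one pass that records, for each '|',
-- the '<'-run before and '>'-run after it (alternative decomposition; not claimed faster).


-- ===== PORT A =====
-- the 'for level in range(1, max_level + 1)' loop with its early return
def pvDetectGoA (s : List Char) : List Int → Option (String × Int × Int)
  | [] => none
  | level :: rest =>
      -- "<" * level + "|" + ">" * level  (str*int = replicate; level ≥ 1 here)
      let marker : List Char :=
        List.replicate level.toNat '<' ++ ['|'] ++ List.replicate level.toNat '>'
      let count := PySem.Chars.count s marker
      if count = 1 then
        let pos := PySem.Chars.find s marker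
        some (String.ofList marker, pos, pos + (marker.length : Int))
      else
        pvDetectGoA s rest   -- count == 0 and count > 1 both 'continue'

def detect_marker (text : String) : Option (String × Int × Int) :=
  pvDetectGoA text.toList (PySem.List.pyRange 1 (10 + 1) 1)

-- ===== PORT B =====
-- _run_gt(s, j) applied to s.drop j: 'while s[j+b] == ">": b += 1'
def pvRunGt : List Char → Nat
  | [] => 0
  | c :: t => if c = '>' then pvRunGt t + 1 else 0

-- the 'for c in text' pass: t is the unread rest, i the index, run the current '<'-run
def pvScan (full : List Char) : List Char → Nat → Nat → List (Nat × Nat)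
  | [], _, _ => []
  | c :: t, i, run =>
      (if c = '|' then [(i, min (min run (pvRunGt (full.drop (i + 1)))) 10)] else [])
        ++ pvScan full t (i + 1) (if c = '<' then run + 1 else 0)

-- the 'for level in range(1, 11)' selection loop
def pvSelect (pipes : List (Nat × Nat)) : List Int → Option (String × Int × Int)
  | [] => none
  | level :: rest =>
      let hits := (pipes.filter (fun pm => level ≤ (pm.2 : Int))).map Prod.fst
      if hits.length = 1 then
        let p := hits.headI   -- hits[0], guarded by length = 1
        some (String.ofList (List.replicate level.toNat '<' ++ ['|'] ++ List.replicate level.toNat '>'),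
              (p : Int) - level, (p : Int) + level + 1)
      else
        pvSelect pipes rest

def detect_marker_alt (text : String) : Option (String × Int × Int) :=
  pvSelect (pvScan text.toList text.toList 0 0) (PySem.List.pyRange 1 11 1)

-- ===== PRECONDITION & SPEC =====
def Spec_detect_marker (text : String) (out : Option (String × Int × Int)) : Prop := out = detect_marker_alt text
instance (text : String) (out : Option (String × Int × Int)) : Decidable (Spec_detect_marker text out) := by unfold Spec_detect_marker; infer_instance

-- ===== CLAIM (what is proved, stated in full; the proofs are below) =====
def Claim_equal_detect_marker : Prop := ∀ (text : String), Dom_detect_marker text → Spec_detect_marker text (detect_marker text)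

-- ===== LEMMAS AND PROOFS =====

-- the level-L marker as a character list
def pvMarker (L : Nat) : List Char := List.replicate L '<' ++ ['|'] ++ List.replicate L '>'

-- occurrence of the level-L marker at offset j
def pvOccP (s : List Char) (L : Nat) (j : Nat) : Bool := (pvMarker L).isPrefixOf (s.drop j)

-- '<'-run of s ending just before index i (the value of B's 'run' variable at index i)
def pvLtRun (s : List Char) : Nat → Nat
  | 0 => 0
  | i + 1 => if s[i]? = some '<' then pvLtRun s i + 1 else 0

lemma pvMarker_length (L : Nat) : (pvMarker L).length = 2 * L + 1 := by
  simp [pvMarker]; omega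

lemma pvMarker_getElem? (L k : Nat) (hk : k < 2 * L + 1) :
    (pvMarker L)[k]? = some (if k < L then '<' else if k = L then '|' else '>') := by
  simp only [pvMarker, List.append_assoc, List.getElem?_append, List.getElem?_replicate,
    List.length_replicate, List.getElem?_cons, List.singleton_append]
  split_ifs <;> first | rfl | omega

-- a prefix pins down the leading elements
lemma pvPrefix_getElem? (a t : List Char) (h : a <+: t) (i : Nat) (hi : i < a.length) :
    t[i]? = a[i]? := by
  rw [List.prefix_iff_eq_take.mp h, List.getElem?_take_of_lt hi]

-- the marker cannot overlap a shifted copy of itself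
lemma pvSep (L : Nat) (hL : 1 ≤ L) (s : List Char) (h : pvMarker L <+: s)
    (d : Nat) (hd0 : 0 < d) (hd : d < 2 * L + 1) : ¬ pvMarker L <+: s.drop d := by
  intro h2
  by_cases hdL : d ≤ L
  · have e1 : s[d + L]? = some '>' := by
      rw [pvPrefix_getElem? _ _ h (d + L) (by rw [pvMarker_length]; omega),
        pvMarker_getElem? L (d + L) (by omega), if_neg (by omega), if_neg (by omega)]
    have e2 : s[d + L]? = some '|' := by
      have h3 := pvPrefix_getElem? _ _ h2 L (by rw [pvMarker_length]; omega)
      rw [List.getElem?_drop] at h3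
      rw [h3, pvMarker_getElem? L L (by omega), if_neg (by omega), if_pos rfl]
    rw [e1] at e2
    exact absurd (Option.some.inj e2) (by decide)
  · have e1 : s[d]? = some '>' := by
      rw [pvPrefix_getElem? _ _ h d (by rw [pvMarker_length]; omega),
        pvMarker_getElem? L d (by omega), if_neg (by omega), if_neg (by omega)]
    have e2 : s[d]? = some '<' := by
      have h3 := pvPrefix_getElem? _ _ h2 0 (by rw [pvMarker_length]; omega)
      rw [List.getElem?_drop, Nat.add_zero] at h3
      rw [h3, pvMarker_getElem? L 0 (by omega), if_pos (by omega)]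
    rw [e1] at e2
    exact absurd (Option.some.inj e2) (by decide)

lemma pvReplicate_prefix_iff (n : Nat) (c : Char) (t : List Char) :
    List.replicate n c <+: t ↔ n ≤ t.length ∧ ∀ i < n, t[i]? = some c := by
  induction n generalizing t with
  | zero => simp
  | succ m ih =>
    cases t with
    | nil => simp
    | cons x t =>
      rw [List.replicate_succ, List.cons_prefix_cons, ih]
      constructor
      · rintro ⟨hc, hlen, hall⟩
        refine ⟨by simpa using hlen, ?_⟩
        intro i hi
        cases i with
        | zero => simpa using hc.symm
        | succ j => simpa using hall j (by omega)
      · rintro ⟨hlen, hall⟩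
        refine ⟨by have := hall 0 (by omega); simp at this; exact this.symm, by simpa using hlen, ?_⟩
        intro i hi
        simpa using hall (i + 1) (by omega)

lemma pvAppend_prefix_iff (a b t : List Char) :
    a ++ b <+: t ↔ a <+: t ∧ b <+: t.drop a.length := by
  constructor
  · rintro ⟨r, hr⟩
    subst hr
    exact ⟨⟨b ++ r, by simp⟩, ⟨r, by simp⟩⟩
  · rintro ⟨h1, ⟨r, hr⟩⟩
    refine ⟨r, ?_⟩
    conv_rhs => rw [← List.take_append_drop a.length t]
    rw [List.append_assoc, hr, ← List.prefix_iff_eq_take.mp h1]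

lemma pvRunGt_le (t : List Char) : pvRunGt t ≤ t.length := by
  induction t with
  | nil => simp [pvRunGt]
  | cons c t ih => simp only [pvRunGt]; split <;> simp; omega

lemma pvRunGt_ge_iff (L : Nat) (t : List Char) :
    L ≤ pvRunGt t ↔ List.replicate L '>' <+: t := by
  induction L generalizing t with
  | zero => simp
  | succ m ih =>
    cases t with
    | nil => simp [pvRunGt]
    | cons c t =>
      simp only [pvRunGt, List.replicate_succ, List.cons_prefix_cons]
      by_cases hc : c = '>'
      · simp [hc, ← ih]
      · simp [hc, Ne.symm hc]

lemma pvLtRun_le (s : List Char) (i : Nat) : pvLtRun s i ≤ i := by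
  induction i with
  | zero => simp [pvLtRun]
  | succ j ih => simp only [pvLtRun]; split <;> omega

lemma pvLtRun_ge_iff' (s : List Char) (L k : Nat) :
    L ≤ pvLtRun s k ↔ L ≤ k ∧ ∀ i < L, s[k - 1 - i]? = some '<' := by
  induction L generalizing k with
  | zero => simp
  | succ m ih =>
    cases k with
    | zero => simp [pvLtRun]
    | succ j =>
      simp only [pvLtRun]
      by_cases hj : s[j]? = some '<'
      · rw [if_pos hj, Nat.succ_le_succ_iff, ih j]
        constructor
        · rintro ⟨hm, hall⟩
          refine ⟨by omega, ?_⟩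
          intro i hi
          rcases Nat.eq_zero_or_pos i with hi0 | hi0
          · subst hi0; simpa using hj
          · rw [show j + 1 - 1 - i = j - 1 - (i - 1) from by omega]
            exact hall (i - 1) (by omega)
        · rintro ⟨hm, hall⟩
          refine ⟨by omega, ?_⟩
          intro i hi
          rw [show j - 1 - i = j + 1 - 1 - (i + 1) from by omega]
          exact hall (i + 1) (by omega)
      · rw [if_neg hj]
        constructor
        · omega
        · rintro ⟨hm, hall⟩
          exact absurd (by simpa using hall 0 (by omega)) hj

lemma pvLtRun_ge_iff (s : List Char) (L k : Nat) (hk : k ≤ s.length) :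
    L ≤ pvLtRun s k ↔ L ≤ k ∧ List.replicate L '<' <+: s.drop (k - L) := by
  rw [pvLtRun_ge_iff']
  constructor
  · rintro ⟨hLk, hall⟩
    refine ⟨hLk, (pvReplicate_prefix_iff _ _ _).mpr ⟨by simp; omega, ?_⟩⟩
    intro i hi
    rw [List.getElem?_drop, show k - L + i = k - 1 - (L - 1 - i) from by omega]
    exact hall (L - 1 - i) (by omega)
  · rintro ⟨hLk, hpre⟩
    refine ⟨hLk, ?_⟩
    intro i hi
    have := ((pvReplicate_prefix_iff _ _ _).mp hpre).2 (L - 1 - i) (by omega)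
    rw [List.getElem?_drop, show k - L + (L - 1 - i) = k - 1 - i from by omega] at this
    exact this

-- occurrence at j ↔ pipe at j+L with long enough runs on both sides
lemma pvOccP_iff (s : List Char) (L j : Nat) :
    pvOccP s L j = true ↔
      j + 2 * L + 1 ≤ s.length ∧ s[j + L]? = some '|' ∧
      List.replicate L '<' <+: s.drop j ∧ List.replicate L '>' <+: s.drop (j + L + 1) := by
  rw [pvOccP, List.isPrefixOf_iff_prefix, pvMarker, List.append_assoc, pvAppend_prefix_iff,
    pvAppend_prefix_iff]
  simp only [List.length_replicate, List.length_cons, List.length_nil, List.drop_drop,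
    Nat.zero_add]
  constructor
  · rintro ⟨h1, h2, h3⟩
    have h2' : s[j + L]? = some '|' := by
      have h4 := pvPrefix_getElem? _ _ h2 0 (by simp)
      rw [List.getElem?_drop, Nat.add_zero] at h4
      rw [h4]
      rfl
    have hmid : j + L < s.length := by
      rcases List.getElem?_eq_some_iff.mp h2' with ⟨hlt, -⟩
      exact hlt
    have h3' := ((pvReplicate_prefix_iff _ _ _).mp h3).1
    refine ⟨?_, h2', h1, h3⟩
    simp only [List.length_drop] at h3'
    omega
  · rintro ⟨hlen, h2, h1, h3⟩
    refine ⟨h1, ?_, h3⟩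
    have hd : (s.drop (j + L)).head? = some '|' := by
      rw [List.head?_drop]; exact h2
    rcases List.head?_eq_some_iff.mp hd with ⟨t, ht⟩
    rw [ht]
    exact ⟨t, rfl⟩

-- the greedy non-overlapping scan of text.count counts every occurrence offset,
-- because the marker cannot overlap a shifted copy of itself (pvSep)
lemma pvGoCount_eq (L : Nat) (hL : 1 ≤ L) :
    ∀ fuel l acc, l.length ≤ fuel →
      PySem.Chars.count.go (pvMarker L) fuel l acc
        = acc + (List.range l.length).countP (fun j => (pvMarker L).isPrefixOf (l.drop j)) := by
  intro fuel
  induction fuel with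
  | zero =>
    intro l acc hfu
    have : l = [] := List.eq_nil_of_length_eq_zero (Nat.le_zero.mp hfu)
    subst this
    simp [PySem.Chars.count.go]
  | succ n ih =>
    intro l acc hfu
    cases l with
    | nil => simp [PySem.Chars.count.go]
    | cons h t =>
      rw [PySem.Chars.count.go]
      by_cases hp : (pvMarker L).isPrefixOf (h :: t)
      · rw [if_pos hp]
        have hpre := List.isPrefixOf_iff_prefix.mp hp
        have hkle : (pvMarker L).length ≤ (h :: t).length := hpre.length_le
        have hk1 : 1 ≤ (pvMarker L).length := by rw [pvMarker_length]; omega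
        have hfuel2 : (List.drop (pvMarker L).length (h :: t)).length ≤ n := by
          simp only [List.length_drop]
          simp only [List.length_cons] at hfu ⊢
          omega
        rw [ih _ _ hfuel2]
        have main : (List.range (h :: t).length).countP
              (fun j => (pvMarker L).isPrefixOf ((h :: t).drop j))
            = 1 + (List.range (List.drop (pvMarker L).length (h :: t)).length).countP
              (fun j => (pvMarker L).isPrefixOf ((List.drop (pvMarker L).length (h :: t)).drop j)) := by
          rw [show (h :: t).length = (pvMarker L).length + ((h :: t).length - (pvMarker L).length)
            from by omega, List.range_add, List.countP_append, List.countP_map]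
          have h1 : (List.range (pvMarker L).length).countP
              (fun j => (pvMarker L).isPrefixOf ((h :: t).drop j)) = 1 := by
            rw [show (pvMarker L).length = ((pvMarker L).length - 1) + 1 from by omega,
              List.range_succ_eq_map, List.countP_cons, List.countP_map]
            have hz : (List.range ((pvMarker L).length - 1)).countP
                ((fun j => (pvMarker L).isPrefixOf ((h :: t).drop j)) ∘ Nat.succ) = 0 := by
              rw [List.countP_eq_zero]
              intro a ha
              simp only [List.mem_range] at ha
              simp only [Function.comp_apply]
              intro hcontra
              exact pvSep L hL (h :: t) hpre (a + 1) (by omega)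
                (by have := pvMarker_length L; omega)
                (List.isPrefixOf_iff_prefix.mp (by simpa using hcontra))
            rw [hz]
            simpa using hp
          rw [h1]
          simp only [List.length_drop]
          congr 1
          refine List.countP_congr ?_
          intro j _
          simp [Function.comp, List.drop_drop]
        simp only [List.length_drop] at main ⊢
        omega
      · rw [if_neg hp]
        have hfuel2 : t.length ≤ n := by simpa using hfu
        rw [ih t acc hfuel2]
        congr 1
        rw [show (h :: t).length = t.length + 1 from rfl, List.range_succ_eq_map,
          List.countP_cons, List.countP_map]
        simp [hp, Function.comp_def]

-- A's text.count equals the number of occurrence offsets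
lemma pvCount_eq (s : List Char) (L : Nat) (hL : 1 ≤ L) :
    PySem.Chars.count s (pvMarker L) = (List.range s.length).countP (pvOccP s L) := by
  have hne : (pvMarker L).isEmpty = false := by simp [pvMarker]
  rw [PySem.Chars.count, hne]
  simp only [Bool.false_eq_true, if_false]
  rw [pvGoCount_eq L hL s.length s 0 le_rfl, Nat.zero_add]
  rfl

-- B's scan produces one entry per '|', carrying the capped min of the two runs
def pvPipesSpec (s : List Char) : List (Nat × Nat) :=
  (List.range s.length).filterMap (fun k =>
    if s[k]? = some '|' then
      some (k, min (min (pvLtRun s k) (pvRunGt (s.drop (k + 1)))) 10)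
    else none)

-- the single pass visits every index with 'run' equal to the '<'-run ending there
lemma pvScanFrom (s : List Char) : ∀ m i, i ≤ s.length → s.length - i = m →
    pvScan s (s.drop i) i (pvLtRun s i)
      = (List.range' i m).filterMap (fun k =>
          if s[k]? = some '|' then
            some (k, min (min (pvLtRun s k) (pvRunGt (s.drop (k + 1)))) 10)
          else none) := by
  intro m
  induction m with
  | zero =>
    intro i hi hm
    have hnil : s.drop i = [] := List.drop_eq_nil_of_le (by omega)
    rw [hnil]
    simp [pvScan]
  | succ n ih =>
    intro i hi hm
    have hlt : i < s.length := by omega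
    have hrun : (if s[i] = '<' then pvLtRun s i + 1 else 0) = pvLtRun s (i + 1) := by
      rw [pvLtRun, List.getElem?_eq_getElem hlt]
      by_cases h : s[i] = '<' <;> simp [h]
    have htail := ih (i + 1) (by omega) (by omega)
    rw [List.drop_eq_getElem_cons hlt, pvScan, hrun, htail, List.range'_succ,
      List.filterMap_cons]
    by_cases hpipe : s[i] = '|' <;> simp [hpipe, List.getElem?_eq_getElem hlt]

lemma pvScan_eq (s : List Char) : pvScan s s 0 0 = pvPipesSpec s := by
  have h := pvScanFrom s s.length 0 (by omega) (by omega)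
  rw [pvPipesSpec, List.range_eq_range']
  simpa [pvLtRun] using h

lemma pvFilterMap_eq (l : List Nat) (p : Nat → Bool) (f : Nat → Nat) :
    (l.filter p).map f = l.filterMap (fun a => if p a then some (f a) else none) := by
  induction l with
  | nil => rfl
  | cons a t ih => by_cases h : p a <;> simp [h, ih]

-- B's hits at level L are the occurrence offsets shifted by L
lemma pvHits_eq (s : List Char) (L : Nat) (hL1 : 1 ≤ L) (hL10 : L ≤ 10) :
    ((pvPipesSpec s).filter (fun pm => (L : Int) ≤ (pm.2 : Int))).map Prod.fst =
      ((List.range s.length).filter (pvOccP s L)).map (· + L) := by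
  have hocc_bound : ∀ k, pvOccP s L k = true → k + 2 * L + 1 ≤ s.length := by
    intro k hk
    exact ((pvOccP_iff s L k).mp hk).1
  have lhs_eq : ((pvPipesSpec s).filter (fun pm => (L : Int) ≤ (pm.2 : Int))).map Prod.fst
      = (List.range s.length).filterMap
          (fun k => if L ≤ k ∧ pvOccP s L (k - L) = true then some k else none) := by
    rw [pvPipesSpec, List.filter_filterMap, List.map_filterMap]
    refine List.filterMap_congr ?_
    intro k hk
    simp only [List.mem_range] at hk
    by_cases hpipe : s[k]? = some '|'
    · rw [if_pos hpipe]
      by_cases hcond : (L : Int) ≤ ((min (min (pvLtRun s k) (pvRunGt (s.drop (k + 1)))) 10 : Nat) : Int)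
      · have hnat : L ≤ min (min (pvLtRun s k) (pvRunGt (s.drop (k + 1)))) 10 := by
          exact_mod_cast hcond
        have hlt : L ≤ pvLtRun s k := by omega
        have hgt : L ≤ pvRunGt (s.drop (k + 1)) := by omega
        have hLk : L ≤ k := le_trans hlt (pvLtRun_le s k)
        have hocc : pvOccP s L (k - L) = true := by
          rw [pvOccP_iff]
          have hgl := pvRunGt_le (s.drop (k + 1))
          simp only [List.length_drop] at hgl
          refine ⟨by omega, ?_, ?_, ?_⟩
          · rw [show k - L + L = k from by omega]; exact hpipe
          · exact ((pvLtRun_ge_iff s L k (by omega)).mp hlt).2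
          · rw [show k - L + L + 1 = k + 1 from by omega]
            exact (pvRunGt_ge_iff L _).mp hgt
        simp [Option.filter, hLk, hocc]
        exact ⟨hlt, hgt, hL10⟩
      · have : ¬ (L ≤ k ∧ pvOccP s L (k - L) = true) := by
          rintro ⟨hLk, hocc⟩
          rcases (pvOccP_iff s L (k - L)).mp hocc with ⟨hlen, hmid, hlpre, hgpre⟩
          have hlt : L ≤ pvLtRun s k := by
            rw [pvLtRun_ge_iff s L k (by omega)]
            exact ⟨hLk, hlpre⟩
          have hgt : L ≤ pvRunGt (s.drop (k + 1)) := by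
            rw [pvRunGt_ge_iff]
            rw [show k - L + L + 1 = k + 1 from by omega] at hgpre
            exact hgpre
          exact hcond (by exact_mod_cast (by omega :
            L ≤ min (min (pvLtRun s k) (pvRunGt (s.drop (k + 1)))) 10))
        simp [Option.filter, this]
        intro h1 h2
        omega
    · rw [if_neg hpipe]
      have : ¬ (L ≤ k ∧ pvOccP s L (k - L) = true) := by
        rintro ⟨hLk, hocc⟩
        rcases (pvOccP_iff s L (k - L)).mp hocc with ⟨-, hmid, -, -⟩
        rw [show k - L + L = k from by omega] at hmid
        exact hpipe hmid
      simp [this]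
  have rhs_eq : ((List.range s.length).filter (pvOccP s L)).map (· + L)
      = (List.range s.length).filterMap
          (fun k => if L ≤ k ∧ pvOccP s L (k - L) = true then some k else none) := by
    rw [pvFilterMap_eq]
    have e1 : (List.range s.length).filterMap
          (fun j => if pvOccP s L j = true then some (j + L) else none)
        = ((List.range s.length).map (· + L)).filterMap
          (fun k => if pvOccP s L (k - L) = true then some k else none) := by
      rw [List.filterMap_map]
      refine List.filterMap_congr ?_
      intro j _
      simp [Function.comp]
    have e2 : (List.range s.length).map (· + L) = List.range' L s.length := by
      rw [List.range'_eq_map_range]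
      exact List.map_congr_left (fun a _ => Nat.add_comm a L)
    have e3 : (List.range' L s.length).filterMap
          (fun k => if pvOccP s L (k - L) = true then some k else none)
        = (List.range' L s.length).filterMap
          (fun k => if L ≤ k ∧ pvOccP s L (k - L) = true then some k else none) := by
      refine List.filterMap_congr ?_
      intro k hk
      have hLk : L ≤ k := (List.mem_range'_1.mp hk).1
      simp [hLk]
    have e4 : (List.range (L + s.length)).filterMap
          (fun k => if L ≤ k ∧ pvOccP s L (k - L) = true then some k else none)
        = (List.range' L s.length).filterMap
          (fun k => if L ≤ k ∧ pvOccP s L (k - L) = true then some k else none) := by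
      rw [List.range_add, List.filterMap_append, ← List.range'_eq_map_range]
      have : (List.range L).filterMap
          (fun k => if L ≤ k ∧ pvOccP s L (k - L) = true then some k else none) = [] := by
        rw [List.filterMap_eq_nil_iff]
        intro k hk
        simp only [List.mem_range] at hk
        simp [show ¬ (L ≤ k ∧ pvOccP s L (k - L) = true) from by omega]
      rw [this, List.nil_append]
    have e5 : (List.range (L + s.length)).filterMap
          (fun k => if L ≤ k ∧ pvOccP s L (k - L) = true then some k else none)
        = (List.range s.length).filterMap
          (fun k => if L ≤ k ∧ pvOccP s L (k - L) = true then some k else none) := by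
      rw [Nat.add_comm, List.range_add, List.filterMap_append]
      have : (List.filterMap
          (fun k => if L ≤ k ∧ pvOccP s L (k - L) = true then some k else none)
          ((List.range L).map (fun x => s.length + x))) = [] := by
        rw [List.filterMap_eq_nil_iff]
        intro k hk
        simp only [List.mem_map, List.mem_range] at hk
        rcases hk with ⟨a, ha, rfl⟩
        have : ¬ (L ≤ s.length + a ∧ pvOccP s L (s.length + a - L) = true) := by
          rintro ⟨hLk, hocc⟩
          have := hocc_bound _ hocc
          omega
        simp [this]
      rw [this, List.append_nil]
    rw [e1, e2, e3, ← e4, e5]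
  rw [lhs_eq, rhs_eq]

-- when there is exactly one occurrence, find points at it
lemma pvFind_eq (s : List Char) (L j : Nat)
    (h : (List.range s.length).filter (pvOccP s L) = [j]) :
    PySem.Chars.find s (pvMarker L) = (j : Int) := by
  have hjmem : j ∈ (List.range s.length).filter (pvOccP s L) := by
    rw [h]; exact List.mem_singleton.mpr rfl
  rcases List.mem_filter.mp hjmem with ⟨hjr, hjp⟩
  have hjn : j < s.length := List.mem_range.mp hjr
  have huniq : ∀ j', j' < s.length → pvOccP s L j' = true → j' = j := by
    intro j' h1 h2
    have : j' ∈ (List.range s.length).filter (pvOccP s L) :=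
      List.mem_filter.mpr ⟨List.mem_range.mpr h1, h2⟩
    rw [h] at this
    exact List.mem_singleton.mp this
  have hpre : pvMarker L <+: s.drop j := by
    rw [pvOccP] at hjp
    exact List.isPrefixOf_iff_prefix.mp hjp
  have hisin : PySem.Chars.isIn (pvMarker L) s = true :=
    (PySem.Chars.exists_prefix_drop_iff_isIn _ _).mp ⟨j, hpre⟩
  have hnonneg : 0 ≤ PySem.Chars.find s (pvMarker L) :=
    (PySem.Chars.find_nonneg_iff _ _).mpr ((PySem.Chars.isIn_iff_infix _ _).mp hisin)
  rcases PySem.Chars.find_spec hnonneg with ⟨hfpre, -⟩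
  have hfle := PySem.Chars.find_le_length s (pvMarker L)
  have hflt : (PySem.Chars.find s (pvMarker L)).toNat < s.length := by
    by_contra hcon
    have hnil : s.drop (PySem.Chars.find s (pvMarker L)).toNat = [] :=
      List.drop_eq_nil_of_le (by omega)
    rw [hnil] at hfpre
    have := hfpre.length_le
    rw [pvMarker_length] at this
    simp at this
  have hocc : pvOccP s L (PySem.Chars.find s (pvMarker L)).toNat = true := by
    rw [pvOccP]
    exact List.isPrefixOf_iff_prefix.mpr hfpre
  have := huniq _ hflt hocc
  omega

-- the two level loops agree, level by level
lemma pvLoop_eq (s : List Char) (ls : List Int) (hls : ∀ L ∈ ls, 1 ≤ L ∧ L ≤ 10) :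
    pvDetectGoA s ls = pvSelect (pvPipesSpec s) ls := by
  induction ls with
  | nil => rfl
  | cons level rest ih =>
    have hlev := hls level List.mem_cons_self
    have hrest : ∀ L ∈ rest, 1 ≤ L ∧ L ≤ 10 := fun L hL => hls L (List.mem_cons_of_mem _ hL)
    obtain ⟨hl1, hl10⟩ := hlev
    have hcast : ((level.toNat : Int)) = level := Int.toNat_of_nonneg (by omega)
    have hL1 : 1 ≤ level.toNat := by omega
    have hL10 : level.toNat ≤ 10 := by omega
    simp only [pvDetectGoA, pvSelect]
    rw [show (List.replicate level.toNat '<' ++ ['|'] ++ List.replicate level.toNat '>')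
      = pvMarker level.toNat from rfl]
    rw [pvCount_eq s level.toNat hL1]
    rw [show (fun pm : Nat × Nat => decide (level ≤ (pm.2 : Int)))
      = (fun pm : Nat × Nat => decide ((level.toNat : Int) ≤ (pm.2 : Int))) from by rw [hcast]]
    rw [pvHits_eq s level.toNat hL1 hL10]
    rw [List.length_map, List.countP_eq_length_filter]
    by_cases hone : ((List.range s.length).filter (pvOccP s level.toNat)).length = 1
    · rw [if_pos hone, if_pos hone]
      obtain ⟨j, hj⟩ := List.length_eq_one_iff.mp hone
      rw [pvFind_eq s level.toNat j hj, hj]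
      simp only [List.map_cons, List.map_nil, List.headI, pvMarker_length]
      refine congrArg some ?_
      refine Prod.ext rfl (Prod.ext ?_ ?_) <;> simp <;> omega
    · rw [if_neg hone, if_neg hone]
      exact ih hrest

-- ===== VERDICT (by name: the statement is the Claim_ definition above) =====
theorem detect_marker_spec : Claim_equal_detect_marker := by
  intro text _
  show detect_marker text = detect_marker_alt text
  unfold detect_marker detect_marker_alt
  rw [pvScan_eq]
  exact pvLoop_eq text.toList _ (by decide)
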